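-- pv_equiv track=rewrite | github.com/HootingYard/archive_management | src/hootingyard/utils/fix_filenames.py | extract_date_string
-- ===== SOURCE A (Python) =====
-- def extract_date_string(filename):
--     filename = filename.replace(".mp3", "")
--     filename = filename.replace("_", " ")
--     filename = filename.replace("-", " ")
--
--     for s in ["hooting", "yard", "on", "the", "air"]:
--         if filename.lower().startswith(s):
--             filename = filename[len(s):]
--             filename = filename.lstrip()
--
--     for s in ["fixed"]:
--         if filename.lower().endswith(s):
--             filename = filename[:-1*len(s)]
--             filename = filename.lstrip()
--
--     return filename
-- ===== SOURCE B (Python) =====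
-- def extract_date_string(filename):
--     s = filename.replace(".mp3", "").replace("_", " ").replace("-", " ")
--     i = 0
--     for w in ("hooting", "yard", "on", "the", "air"):
--         if s[i:i + len(w)].lower() == w:
--             i += len(w)
--             while i < len(s) and s[i].isspace():
--                 i += 1
--     s = s[i:]
--     if s.lower().endswith("fixed"):
--         s = s[:-5].lstrip()
--     return s
-- ===== Notes on version B (the rewrite author's own statement) =====
-- stated objective: alternative
-- what changed: A repeatedly rebuilds the string (slice off each matched prefix word, then lstrip a fresh string); B keeps the string fixed and advances a single integer cursor over it in one scan, slicing only once at the end, with the conditional suffix handling kept.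
import Mathlib
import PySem

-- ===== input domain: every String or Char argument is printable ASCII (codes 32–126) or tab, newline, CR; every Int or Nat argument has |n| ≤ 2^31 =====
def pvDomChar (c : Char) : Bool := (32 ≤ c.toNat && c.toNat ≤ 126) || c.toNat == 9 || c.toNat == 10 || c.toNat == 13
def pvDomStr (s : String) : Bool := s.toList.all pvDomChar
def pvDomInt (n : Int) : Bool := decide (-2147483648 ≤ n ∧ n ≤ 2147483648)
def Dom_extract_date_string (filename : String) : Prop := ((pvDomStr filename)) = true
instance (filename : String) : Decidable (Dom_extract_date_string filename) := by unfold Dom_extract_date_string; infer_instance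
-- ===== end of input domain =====

-- B replaces A's repeated slice-and-lstrip string rebuilding by a single cursor scanned
-- once over the string (alternative decomposition; no new allocations per stripped word).

-- ===== PORT A =====
def pvStepA (f : String) (s : String) : String :=
  if PySem.Str.startswith (PySem.Str.lower f) s = true then
    PySem.Str.lstrip (PySem.Str.slice f (some (PySem.Str.len s : Int)) none)
  else f

def extract_date_string (filename : String) : String :=
  let f1 := PySem.Str.replace filename ".mp3" ""
  let f2 := PySem.Str.replace f1 "_" " "
  let f3 := PySem.Str.replace f2 "-" " "
  let f4 := ["hooting", "yard", "on", "the", "air"].foldl pvStepA f3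
  let f5 := ["fixed"].foldl (fun f s =>
      if PySem.Str.endswith (PySem.Str.lower f) s = true then
        PySem.Str.lstrip (PySem.Str.slice f none (some (-1 * (PySem.Str.len s : Int))))
      else f) f4
  f5

-- ===== PORT B =====
-- while i < len(s) and s[i].isspace(): i += 1
def pvSkipWs (cs : List Char) (i : Nat) : Nat :=
  if h : i < cs.length then
    if PySem.Chars.isspace cs[i] then pvSkipWs cs (i + 1) else i
  else i
termination_by cs.length - i

-- if s[i:i+len(w)].lower() == w: i += len(w); <skip whitespace>
def pvConsume (cs : List Char) (i : Nat) (w : List Char) : Nat :=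
  if PySem.Chars.lower ((cs.drop i).take w.length) = w then pvSkipWs cs (i + w.length) else i

def extract_date_string_alt (filename : String) : String :=
  let s := PySem.Str.replace (PySem.Str.replace (PySem.Str.replace filename ".mp3" "") "_" " ") "-" " "
  let cs := s.toList
  let i := ["hooting", "yard", "on", "the", "air"].foldl (fun i w => pvConsume cs i w.toList) 0
  let t := String.ofList (cs.drop i)
  if PySem.Str.endswith (PySem.Str.lower t) "fixed" = true then
    PySem.Str.lstrip (PySem.Str.slice t none (some (-5)))
  else t

-- ===== PRECONDITION & SPEC =====
def Spec_extract_date_string (filename : String) (out : String) : Prop := out = extract_date_string_alt filename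
instance (filename : String) (out : String) : Decidable (Spec_extract_date_string filename out) := by unfold Spec_extract_date_string; infer_instance

-- ===== CLAIM (what is proved, stated in full; the proofs are below) =====
def Claim_equal_extract_date_string : Prop := ∀ (filename : String), Dom_extract_date_string filename → Spec_extract_date_string filename (extract_date_string filename)

-- ===== LEMMAS AND PROOFS =====
lemma skip_drop (cs : List Char) (i : Nat) :
    cs.drop (pvSkipWs cs i) = (cs.drop i).dropWhile PySem.Chars.isspace := by
  fun_induction pvSkipWs cs i with
  | case1 i h hs ih =>
      rw [ih, List.drop_eq_getElem_cons h, List.dropWhile_cons_of_pos hs]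
  | case2 i h hs =>
      rw [List.drop_eq_getElem_cons h, List.dropWhile_cons_of_neg hs]
  | case3 i h =>
      rw [List.drop_of_length_le (Nat.le_of_not_lt h), List.dropWhile_nil]

lemma cond_eq (cs : List Char) (i : Nat) (w : String) :
    (PySem.Str.startswith (PySem.Str.lower (String.ofList (cs.drop i))) w = true)
      ↔ PySem.Chars.lower ((cs.drop i).take w.toList.length) = w.toList := by
  rw [PySem.Str.startswith_eq]
  simp only [PySem.Chars.startswith_iff, PySem.Str.toList_lower, String.toList_ofList,
    PySem.Chars.lower, List.map_take, List.prefix_iff_eq_take]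
  constructor <;> (intro h; exact h.symm)

lemma step_eq (cs : List Char) (i : Nat) (w : String) :
    pvStepA (String.ofList (cs.drop i)) w = String.ofList (cs.drop (pvConsume cs i w.toList)) := by
  unfold pvStepA pvConsume
  by_cases hc : PySem.Chars.lower ((cs.drop i).take w.toList.length) = w.toList
  · rw [if_pos ((cond_eq cs i w).mpr hc), if_pos hc]
    apply String.toList_inj.mp
    simp only [PySem.Str.toList_lstrip, PySem.Chars.lstrip, PySem.Str.toList_slice,
      PySem.Chars.slice_eq_listSlice, String.toList_ofList, PySem.Str.len, String.length_toList, PySem.List.slice_from_natCast, List.drop_drop,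
      skip_drop, String.length_toList]
  · rw [if_neg (fun h => hc ((cond_eq cs i w).mp h)), if_neg hc]

lemma fold_eq (cs : List Char) (ws : List String) (i : Nat) :
    ws.foldl pvStepA (String.ofList (cs.drop i))
      = String.ofList (cs.drop (ws.foldl (fun i w => pvConsume cs i w.toList) i)) := by
  induction ws generalizing i with
  | nil => rfl
  | cons w ws ih => simp only [List.foldl_cons, step_eq]; exact ih _

-- ===== VERDICT (by name: the statement is the Claim_ definition above) =====
theorem extract_date_string_spec : Claim_equal_extract_date_string := by
  intro filename _
  unfold Spec_extract_date_string
  simp only [extract_date_string, extract_date_string_alt]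
  set r := PySem.Str.replace (PySem.Str.replace (PySem.Str.replace filename ".mp3" "") "_" " ") "-" " " with hr
  have key : ["hooting", "yard", "on", "the", "air"].foldl pvStepA r
      = String.ofList (r.toList.drop
          (["hooting", "yard", "on", "the", "air"].foldl (fun i w => pvConsume r.toList i w.toList) 0)) := by
    conv_lhs => rw [show r = String.ofList (r.toList.drop 0) by rw [List.drop_zero, String.ofList_toList]]
    rw [fold_eq]
  rw [key, List.foldl_cons, List.foldl_nil]
  rw [show (-1 * (PySem.Str.len "fixed" : Int)) = -5 by decide]
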